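-- pv_equiv track=rewrite | github.com/samuelo49/DS-ALGOS | random-pratice-problems/match_fellows_with_skill_level.py.py | canMatchFellows
-- ===== SOURCE A (Python) =====
-- def canMatchFellows(skillMap: dict) -> bool:
--     skillTracker = set()
--
--     for skill in skillMap.values():
--         if skill not in skillTracker:
--             skillTracker.add(skill)
--         else:
--             skillTracker.remove(skill)
--     return len(skillTracker) == 0
-- ===== SOURCE B (Python) =====
-- def canMatchFellows(skillMap: dict) -> bool:
--     counts = {}
--     for skill in skillMap.values():
--         counts[skill] = counts.get(skill, 0) + 1
--     return all(c % 2 == 0 for c in counts.values())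
-- ===== Notes on version B (the rewrite author's own statement) =====
-- stated objective: alternative
-- what changed: Replaces the add/remove toggle on a membership set (empty-at-end check) with a count-then-verify scheme: one pass builds a frequency table of the skill values, a second pass checks every count is even.
import Mathlib
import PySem

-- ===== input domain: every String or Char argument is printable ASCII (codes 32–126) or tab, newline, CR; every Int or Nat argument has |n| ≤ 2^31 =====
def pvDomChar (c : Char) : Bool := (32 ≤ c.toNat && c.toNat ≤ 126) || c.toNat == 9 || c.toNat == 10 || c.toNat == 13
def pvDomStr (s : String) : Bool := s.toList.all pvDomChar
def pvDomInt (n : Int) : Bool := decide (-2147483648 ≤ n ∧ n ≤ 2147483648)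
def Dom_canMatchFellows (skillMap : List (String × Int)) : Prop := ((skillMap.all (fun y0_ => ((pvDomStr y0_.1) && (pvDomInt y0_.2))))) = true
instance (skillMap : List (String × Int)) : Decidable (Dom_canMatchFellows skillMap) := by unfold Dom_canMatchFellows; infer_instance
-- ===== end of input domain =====

-- B replaces A's add/remove toggle on a set (empty-at-end check) with a frequency table
-- built in one pass and a separate all-counts-even pass (objective: alternative).

-- ===== PORT A =====
-- 'skillTracker.remove(skill)' runs only when skill ∈ skillTracker, where remove = discard (no KeyError).
def canMatchFellows (skillMap : List (String × Int)) : Bool :=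
  let skillTracker : PySem.Set Int :=
    skillMap.foldl (fun s p =>
      if ¬ PySem.Set.contains s p.2 then PySem.Set.add s p.2
      else PySem.Set.discard s p.2) PySem.Set.empty
  PySem.Set.len skillTracker == 0

-- ===== PORT B =====
def canMatchFellows_alt (skillMap : List (String × Int)) : Bool :=
  let counts : PySem.Dict Int Int :=
    skillMap.foldl (fun d p => d.modify p.2 0 (· + 1)) PySem.Dict.empty
  counts.values.all (fun c => PySem.Int.mod c 2 == 0)

-- ===== PRECONDITION & SPEC =====
def Spec_canMatchFellows (skillMap : List (String × Int)) (out : Bool) : Prop := out = canMatchFellows_alt skillMap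
instance (skillMap : List (String × Int)) (out : Bool) : Decidable (Spec_canMatchFellows skillMap out) := by unfold Spec_canMatchFellows; infer_instance

-- ===== CLAIM (what is proved, stated in full; the proofs are below) =====
def Claim_equal_canMatchFellows : Prop := ∀ (skillMap : List (String × Int)), Dom_canMatchFellows skillMap → Spec_canMatchFellows skillMap (canMatchFellows skillMap)

-- ===== LEMMAS AND PROOFS =====

def pvSnd (p : String × Int) : Int := p.2

def pvAllEven (v : List Int) : Prop := ∀ x ∈ v, v.count x % 2 = 0

def pvAllEvenB (v : List Int) : Bool := v.all (fun x => v.count x % 2 == 0)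

theorem pvAllEvenB_iff (v : List Int) : pvAllEvenB v = true ↔ pvAllEven v := by
  simp [pvAllEvenB, pvAllEven]

def pvToggle (s : PySem.Set Int) (a : Int) : PySem.Set Int :=
  if ¬ PySem.Set.contains s a then PySem.Set.add s a else PySem.Set.discard s a

theorem pvMem_toggle (s : PySem.Set Int) (a x : Int) :
    x ∈ pvToggle s a ↔ (if x = a then a ∉ s else x ∈ s) := by
  unfold pvToggle
  by_cases hc : PySem.Set.contains s a
  · have ha : a ∈ s := (PySem.Set.contains_iff s a).1 hc
    by_cases hx : x = a
    · simp [ha, hx, PySem.Set.mem_discard]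
    · simp [ha, hx, PySem.Set.mem_discard]
  · have ha : a ∉ s := fun h => hc ((PySem.Set.contains_iff s a).2 h)
    by_cases hx : x = a
    · simp [ha, hx]
    · simp [ha, hx]

theorem pvMem_foldl_toggle (l : List Int) (s : PySem.Set Int) (x : Int) :
    x ∈ l.foldl pvToggle s ↔ Xor' (x ∈ s) (l.count x % 2 = 1) := by
  induction l generalizing s with
  | nil => simp [Xor']
  | cons a t ih =>
    rw [List.foldl_cons, ih, pvMem_toggle, List.count_cons]
    by_cases hx : x = a
    · subst hx
      simp only [beq_self_eq_true, if_pos]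
      unfold Xor'
      rcases Nat.even_or_odd (t.count x) with h | h
      · obtain ⟨k, hk⟩ := h
        have h1 : (t.count x + 1) % 2 = 1 := by omega
        have h2 : ¬ t.count x % 2 = 1 := by omega
        simp [h1, h2]
      · obtain ⟨k, hk⟩ := h
        have h1 : t.count x % 2 = 1 := by omega
        have h2 : ¬ (t.count x + 1) % 2 = 1 := by omega
        simp [h1, h2]
    · simp [hx, Ne.symm hx]

theorem pvTracker_mem (l : List Int) (x : Int) :
    x ∈ l.foldl pvToggle PySem.Set.empty ↔ l.count x % 2 = 1 := by
  rw [pvMem_foldl_toggle]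
  simp [PySem.Set.empty, Xor']

theorem pvTracker_empty_iff (l : List Int) :
    l.foldl pvToggle PySem.Set.empty = [] ↔ pvAllEven l := by
  constructor
  · intro h x hx
    have hm := (pvTracker_mem l x).not
    rw [h] at hm
    simp at hm
    omega
  · intro h
    cases he : l.foldl pvToggle PySem.Set.empty with
    | nil => rfl
    | cons y ys =>
      have hy : y ∈ l.foldl pvToggle PySem.Set.empty := by rw [he]; exact List.mem_cons_self
      have hodd := (pvTracker_mem l y).1 hy
      have hyl : y ∈ l := by
        by_contra hny
        rw [List.count_eq_zero_of_not_mem hny] at hodd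
        omega
      have := h y hyl
      omega

theorem canMatchFellows_eq (l : List (String × Int)) :
    canMatchFellows l = pvAllEvenB (l.map pvSnd) := by
  unfold canMatchFellows
  have hfold : l.foldl (fun s p =>
      if ¬ PySem.Set.contains s p.2 then PySem.Set.add s p.2
      else PySem.Set.discard s p.2) PySem.Set.empty
      = (l.map pvSnd).foldl pvToggle PySem.Set.empty := by
    rw [List.foldl_map]; rfl
  simp only [hfold]
  rw [Bool.eq_iff_iff, pvAllEvenB_iff, ← pvTracker_empty_iff]
  simp [PySem.Set.len, List.length_eq_zero_iff, PySem.Set.empty]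

theorem canMatchFellows_alt_eq (l : List (String × Int)) :
    canMatchFellows_alt l = pvAllEvenB (l.map pvSnd) := by
  unfold canMatchFellows_alt
  have hfold : l.foldl (fun d p => d.modify p.2 0 (· + 1)) PySem.Dict.empty
      = PySem.Dict.counter (l.map pvSnd) := by
    rw [PySem.Dict.counter_eq_foldl, List.foldl_map]; rfl
  simp only [hfold]
  rw [PySem.Dict.values_eq_map_keys _ (PySem.Dict.nodup_keys_counter (l.map pvSnd)) 0]
  rw [List.all_map, PySem.Dict.keys_counter]
  rw [Bool.eq_iff_iff, pvAllEvenB_iff]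
  simp only [List.all_eq_true, Function.comp, PySem.Dict.getD_counter]
  unfold pvAllEven
  constructor
  · intro h x hx
    have hh := h x ((PySem.Set.mem_ofList ((l.map pvSnd)) x).2 hx)
    simp only [beq_iff_eq] at hh
    rw [PySem.Int.mod_eq_emod_of_pos (by omega : (0:Int) < 2)] at hh
    omega
  · intro h x hx
    have hh := h x ((PySem.Set.mem_ofList ((l.map pvSnd)) x).1 hx)
    simp only [beq_iff_eq]
    rw [PySem.Int.mod_eq_emod_of_pos (by omega : (0:Int) < 2)]
    omega

-- ===== VERDICT (by name: the statement is the Claim_ definition above) =====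
theorem canMatchFellows_spec : Claim_equal_canMatchFellows := by
  intro l _
  unfold Spec_canMatchFellows
  rw [canMatchFellows_eq, canMatchFellows_alt_eq]
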